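-- pv_equiv track=rewrite | github.com/RichardMiku/qbot | plugins/Ai/plugins/实用工具/机房助手.py | str_to_hex
-- ===== SOURCE A (Python) =====
-- def str_to_hex(cmd_code):
--     d = 0
--     result_chuli = ""
--     # 调用 hex() 函数将字符串转换为十六进制
--     result = ''.join([format(ord(c), '02x') for c in cmd_code])
--     # result = bytes(cmd_code, 'gbk').hex()
--     for char in result:
--         d = d + 1
--         result_chuli = result_chuli + char
--         # 每一组16进制值后加00填充
--         if d % 2 == 0:
--             result_chuli = result_chuli + "00"
--         # 拼接发送的16进制命令
--     hex_str = "2f0063002000" + result_chuli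
--     return hex_str
-- ===== SOURCE B (Python) =====
-- def str_to_hex(cmd_code):
--     h = ''.join(format(ord(c), '02x') for c in cmd_code)
--     chunks = [h[i:i + 2] for i in range(0, len(h), 2)]
--     return '2f0063002000' + ''.join(chunk + '00' for chunk in chunks)
-- ===== Notes on version B (the rewrite author's own statement) =====
-- stated objective: idiomatic
-- what changed: Replaces A's character-by-character loop with a parity counter and repeated string concatenation by slicing the joined hex string into two-character chunks and joining each chunk with its zero padding in one comprehension.
import Mathlib
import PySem

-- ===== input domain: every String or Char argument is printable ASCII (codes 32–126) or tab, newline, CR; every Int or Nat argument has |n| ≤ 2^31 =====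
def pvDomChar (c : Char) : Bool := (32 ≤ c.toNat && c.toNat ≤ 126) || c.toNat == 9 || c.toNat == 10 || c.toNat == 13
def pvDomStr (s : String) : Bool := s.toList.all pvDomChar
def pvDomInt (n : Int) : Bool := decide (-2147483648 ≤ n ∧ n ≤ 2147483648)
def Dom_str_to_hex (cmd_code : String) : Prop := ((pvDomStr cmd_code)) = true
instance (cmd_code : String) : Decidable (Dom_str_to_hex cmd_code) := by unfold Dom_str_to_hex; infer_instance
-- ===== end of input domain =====

-- B builds the padded body by slicing the joined hex string into 2-char chunks and
-- joining each chunk with '00', instead of A's per-character loop with a parity counter.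

-- ===== PORT A =====
-- hex digit of n < 16, lowercase, as Python's '%x' produces
def hexDigit (n : Nat) : Char := if n < 10 then Char.ofNat (48 + n) else Char.ofNat (87 + n)

-- format(n, '02x'): exact for n < 256 (all characters admitted by Dom_str_to_hex)
def format02x (n : Nat) : List Char := [hexDigit (n / 16), hexDigit (n % 16)]

-- A's for-loop over the hex characters, carrying the counter d and the accumulated string
def loopA : List Char → Nat → List Char → List Char
  | [], _, acc => acc
  | ch :: rest, d, acc =>
      let d' := d + 1
      let acc' := acc ++ [ch]
      let acc'' := if d' % 2 == 0 then acc' ++ ['0', '0'] else acc'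
      loopA rest d' acc''

def str_to_hex (cmd_code : String) : String :=
  let result := (cmd_code.toList.map (fun c => format02x c.toNat)).flatten
  String.mk ("2f0063002000".toList ++ loopA result 0 [])

-- ===== PORT B =====
def str_to_hex_alt (cmd_code : String) : String :=
  let h := (cmd_code.toList.map (fun c => format02x c.toNat)).flatten
  let chunks := (PySem.List.pyRange 0 (h.length : Int) 2).map
    (fun i => PySem.List.slice h (some i) (some (i + 2)))
  String.mk ("2f0063002000".toList ++ (chunks.map (fun ch => ch ++ ['0', '0'])).flatten)

-- ===== PRECONDITION & SPEC =====
def Spec_str_to_hex (cmd_code : String) (out : String) : Prop := out = str_to_hex_alt cmd_code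
instance (cmd_code : String) (out : String) : Decidable (Spec_str_to_hex cmd_code out) := by unfold Spec_str_to_hex; infer_instance

-- ===== CLAIM (what is proved, stated in full; the proofs are below) =====
def Claim_equal_str_to_hex : Prop := ∀ (cmd_code : String), Dom_str_to_hex cmd_code → Spec_str_to_hex cmd_code (str_to_hex cmd_code)

-- ===== LEMMAS AND PROOFS =====

theorem length_flatten_fmt (l : List Char) :
    ((l.map (fun c => format02x c.toNat)).flatten).length = 2 * l.length := by
  induction l with
  | nil => simp
  | cons c t ih =>
    rw [List.map_cons, List.flatten_cons, List.length_append, ih]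
    simp [format02x]
    omega

theorem pyRange_two (m : Nat) :
    PySem.List.pyRange 0 (2 * (m : Int)) 2 =
      (List.range m).map (fun k : Nat => ((2 * (k : Int) : Int))) := by
  rw [PySem.List.pyRange_of_pos 0 (2 * (m : Int)) (by norm_num)]
  rcases Nat.eq_zero_or_pos m with hm | hm
  · subst hm; simp
  · have h1 : (0 : Int) < 2 * (m : Int) := by positivity
    rw [if_pos h1]
    have h2 : ((2 * (m : Int) - 0 + 2 - 1) / 2).toNat = m := by omega
    rw [h2]
    apply List.map_congr_left
    intro k _
    ring

theorem slice_pair (hs : List Char) (k : Nat) :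
    PySem.List.slice hs (some (2 * (k : Int))) (some (2 * (k : Int) + 2)) =
      (hs.drop (2 * k)).take 2 := by
  have h2 : (2 * (k : Int) + 2) = ((2 * k + 2 : Nat) : Int) := by push_cast; ring
  have h1 : (2 * (k : Int)) = ((2 * k : Nat) : Int) := by push_cast; ring
  rw [h2, h1, PySem.List.slice_natCast]
  congr 1
  omega

theorem chunks_eq (l : List Char) :
    (List.range l.length).map
        (fun k => (((l.map (fun c => format02x c.toNat)).flatten).drop (2 * k)).take 2) =
      l.map (fun c => format02x c.toNat) := by
  induction l with
  | nil => simp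
  | cons c t ih =>
    simp only [List.length_cons, List.range_succ_eq_map, List.map_cons, List.map_map,
      List.flatten_cons]
    congr 1

theorem loopA_eq (l : List Char) (d : Nat) (acc : List Char) (hd : d % 2 = 0) :
    loopA ((l.map (fun c => format02x c.toNat)).flatten) d acc =
      acc ++ (l.map (fun c => format02x c.toNat ++ ['0', '0'])).flatten := by
  induction l generalizing d acc with
  | nil => simp [loopA]
  | cons c t ih =>
    have e2 : (d + 1 + 1) % 2 = 0 := by omega
    have h1 : ((d + 1) % 2 == 0) = false := by
      have e1 : (d + 1) % 2 = 1 := by omega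
      simp [e1]
    have h2 : ((d + 1 + 1) % 2 == 0) = true := by simp [e2]
    obtain ⟨a, b, hab⟩ : ∃ a b, format02x c.toNat = [a, b] := ⟨_, _, rfl⟩
    rw [List.map_cons, List.flatten_cons, List.map_cons, List.flatten_cons, hab]
    simp only [List.cons_append, List.nil_append, loopA, h1, h2, Bool.false_eq_true, if_false,
      if_true]
    rw [ih (d + 1 + 1) _ e2]
    simp

theorem str_to_hex_eq (cmd_code : String) : str_to_hex cmd_code = str_to_hex_alt cmd_code := by
  simp only [str_to_hex, str_to_hex_alt]
  set l := cmd_code.toList with hl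
  congr 1
  rw [loopA_eq l 0 [] rfl, List.nil_append]
  congr 1
  rw [length_flatten_fmt l,
    show ((2 * l.length : Nat) : Int) = 2 * (l.length : Int) by push_cast; ring,
    pyRange_two l.length, List.map_map]
  have hsplit : l.map (fun c => format02x c.toNat ++ ['0', '0']) =
      (l.map (fun c => format02x c.toNat)).map (fun ch => ch ++ ['0', '0']) := by
    rw [List.map_map]
    rfl
  conv_lhs => rw [hsplit, ← chunks_eq l]
  simp only [List.map_map]
  congr 1
  apply List.map_congr_left
  intro k _
  simp only [Function.comp_apply]
  rw [slice_pair]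

-- ===== VERDICT (by name: the statement is the Claim_ definition above) =====
theorem str_to_hex_spec : Claim_equal_str_to_hex := by
  intro cmd_code _
  unfold Spec_str_to_hex
  exact str_to_hex_eq cmd_code
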